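-- pv_equiv track=rewrite | github.com/MaurizioMartin/codewars | Katas/36-the-three-amigos.py | three_amigos
-- ===== SOURCE A (Python) =====
-- def parity(n):
--     if n%2 == 0:
--         return 0
--     else:
--         return 1
--
-- def checkList(n,n2,n3):
--     if parity(n) == 0:
--         if parity(n2) == 0:
--             if parity(n3) == 0:
--                 lista = [n,n2,n3]
--                 dif = max(lista) - min(lista)
--                 return lista,dif
--     else:
--         if parity(n2) == 1:
--             if parity(n3) == 1:
--                 lista = [n,n2,n3]
--                 dif = max(lista) - min(lista)
--                 return lista,dif
--
-- def three_amigos(numbers):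
--     lista = []
--     for v in range(len(numbers)):
--         if v < len(numbers)-2:
--             trienio = checkList(numbers[v],numbers[v+1],numbers[v+2])
--             if trienio != None:
--                 lista.append(trienio)
--     lista.sort(key = lambda x: (x[1]))
--     if len(lista) > 0:
--         return lista[0][0]
--     else:
--         return lista
-- ===== SOURCE B (Python) =====
-- def three_amigos(numbers):
--     best = None
--     for a, b, c in zip(numbers, numbers[1:], numbers[2:]):
--         if a % 2 == b % 2 == c % 2:
--             d = max(a, b, c) - min(a, b, c)
--             if best is None or d < best[1]:
--                 best = ([a, b, c], d)
--     return best[0] if best is not None else []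
-- ===== Notes on version B (the rewrite author's own statement) =====
-- stated objective: faster
-- what changed: Replaces A's build-all-candidates-then-stable-sort-by-difference approach with a single linear pass over consecutive triples that keeps the current minimum-difference triple (strict-< update, so first wins, matching the stable sort's tie-breaking).
import Mathlib
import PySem

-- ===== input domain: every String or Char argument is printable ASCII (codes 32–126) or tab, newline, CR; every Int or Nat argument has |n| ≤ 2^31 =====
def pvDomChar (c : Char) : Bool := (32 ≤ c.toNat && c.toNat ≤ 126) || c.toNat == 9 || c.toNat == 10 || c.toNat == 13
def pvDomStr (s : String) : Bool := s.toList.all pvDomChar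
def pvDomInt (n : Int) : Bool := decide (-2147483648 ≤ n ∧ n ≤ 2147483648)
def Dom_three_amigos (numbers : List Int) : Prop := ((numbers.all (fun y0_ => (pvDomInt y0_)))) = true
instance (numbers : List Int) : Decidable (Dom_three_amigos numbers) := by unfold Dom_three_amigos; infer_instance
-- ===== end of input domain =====

-- B replaces A's collect-all-triples-then-sort with a single linear first-min pass (O(n) vs O(n log n)).

-- ===== PORT A =====
def parityP (n : Int) : Int := if PySem.Int.mod n 2 = 0 then 0 else 1

def checkListP (n n2 n3 : Int) : Option (List Int × Int) :=
  if parityP n = 0 then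
    if parityP n2 = 0 then
      if parityP n3 = 0 then
        let lista := [n, n2, n3]
        some (lista, ((PySem.List.max? lista (fun x => x)).getD 0) - ((PySem.List.min? lista (fun x => x)).getD 0))
      else none
    else none
  else
    if parityP n2 = 1 then
      if parityP n3 = 1 then
        let lista := [n, n2, n3]
        some (lista, ((PySem.List.max? lista (fun x => x)).getD 0) - ((PySem.List.min? lista (fun x => x)).getD 0))
      else none
    else none

def three_amigos (numbers : List Int) : List Int :=
  let lista :=
    (PySem.List.pyRange 0 (numbers.length : Int) 1).foldl
      (fun acc v =>
        if v < (numbers.length : Int) - 2 then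
          match checkListP (PySem.List.pyGetD numbers v 0) (PySem.List.pyGetD numbers (v+1) 0)
                           (PySem.List.pyGetD numbers (v+2) 0) with
          | some t => acc ++ [t]
          | none => acc
        else acc) []
  let sorted := PySem.List.sorted lista (fun x => x.2) false
  if sorted.length > 0 then (sorted.headD ([], 0)).1 else []

-- ===== PORT B =====
def bestStep (acc : Option (List Int × Int)) (a b c : Int) : Option (List Int × Int) :=
  if PySem.Int.mod a 2 = PySem.Int.mod b 2 ∧ PySem.Int.mod b 2 = PySem.Int.mod c 2 then
    let d := max a (max b c) - min a (min b c)
    match acc with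
    | none => some ([a, b, c], d)
    | some m => if d < m.2 then some ([a, b, c], d) else some m
  else acc

def bestLoop (acc : Option (List Int × Int)) : List Int → Option (List Int × Int)
  | a :: b :: c :: rest => bestLoop (bestStep acc a b c) (b :: c :: rest)
  | _ => acc

def three_amigos_alt (numbers : List Int) : List Int :=
  match bestLoop none numbers with
  | some m => m.1
  | none => []

-- ===== PRECONDITION & SPEC =====
def Spec_three_amigos (numbers : List Int) (out : List Int) : Prop := out = three_amigos_alt numbers
instance (numbers : List Int) (out : List Int) : Decidable (Spec_three_amigos numbers out) := by unfold Spec_three_amigos; infer_instance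

-- ===== CLAIM (what is proved, stated in full; the proofs are below) =====
def Claim_equal_three_amigos : Prop := ∀ (numbers : List Int), Dom_three_amigos numbers → Spec_three_amigos numbers (three_amigos numbers)

-- ===== LEMMAS AND PROOFS =====

-- the list of same-parity candidate triples, as a structural scan
def cands : List Int → List (List Int × Int)
  | a :: b :: c :: r => (checkListP a b c).toList ++ cands (b :: c :: r)
  | _ => []

-- the body of A's index loop, as a function of the index
def candF (xs : List Int) (v : Nat) : List (List Int × Int) :=
  if (v : Int) < (xs.length : Int) - 2 then
    (checkListP (PySem.List.pyGetD xs (v : Int) 0)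
      (PySem.List.pyGetD xs ((v : Int) + 1) 0)
      (PySem.List.pyGetD xs ((v : Int) + 2) 0)).toList
  else []

-- A's max(lista) - min(lista) on a three-element list, in B's max/min form
theorem maxmin3 (a b c : Int) :
    ((PySem.List.max? [a, b, c] (fun x => x)).getD 0) -
      ((PySem.List.min? [a, b, c] (fun x => x)).getD 0) =
    max a (max b c) - min a (min b c) := by
  simp only [PySem.List.max?, PySem.List.min?, List.foldl]
  split_ifs <;> simp_all <;> (try split_ifs) <;> simp_all <;> omega

-- checkList in closed form: B's parity test and B's max/min expression
theorem checkListP_eq (a b c : Int) :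
    checkListP a b c =
      if PySem.Int.mod a 2 = PySem.Int.mod b 2 ∧ PySem.Int.mod b 2 = PySem.Int.mod c 2 then
        some ([a, b, c], max a (max b c) - min a (min b c))
      else none := by
  have hd : ∀ n : Int, PySem.Int.mod n 2 = n % 2 := fun n => by
    simp [PySem.Int.mod, Int.fmod_eq_emod]
  simp only [checkListP, parityP, hd, maxmin3]
  rcases Int.emod_two_eq a with h1 | h1 <;> rcases Int.emod_two_eq b with h2 | h2 <;>
    rcases Int.emod_two_eq c with h3 | h3 <;> simp [h1, h2, h3]

theorem pyGetD_cons_nat (a : Int) (t : List Int) (i : Nat) :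
    PySem.List.pyGetD (a :: t) ((i : Int) + 1) 0 = PySem.List.pyGetD t (i : Int) 0 := by
  have h : ((i : Int) + 1) = ((i + 1 : Nat) : Int) := by push_cast; ring
  rw [h, PySem.List.pyGetD_natCast, PySem.List.pyGetD_natCast, List.getD_cons_succ]

theorem candF_succ (a : Int) (t : List Int) (v : Nat) :
    candF (a :: t) (v + 1) = candF t v := by
  unfold candF
  have h1 : ((v + 1 : Nat) : Int) = (v : Int) + 1 := by push_cast; ring
  have h2 : (v : Int) + 1 + 1 = ((v + 1 : Nat) : Int) + 1 := by push_cast; ring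
  have h3 : (v : Int) + 1 + 2 = ((v + 2 : Nat) : Int) + 1 := by push_cast; ring
  have hcond : ((v : Int) + 1 < (((a :: t).length : Nat) : Int) - 2) = ((v : Int) < (t.length : Int) - 2) := by
    simp only [List.length_cons]; push_cast
    exact propext (by omega)
  rw [h1]; simp only [hcond]
  rw [h2, h3, pyGetD_cons_nat a t v, pyGetD_cons_nat a t (v + 1), pyGetD_cons_nat a t (v + 2)]
  push_cast
  rfl

-- index-based scan over range(len(xs)) equals the structural scan
theorem range_flatMap_eq_cands (xs : List Int) :
    (List.range xs.length).flatMap (candF xs) = cands xs := by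
  induction xs with
  | nil => simp [cands]
  | cons a t ih =>
    have hlen : (a :: t).length = t.length + 1 := rfl
    rw [hlen, List.range_succ_eq_map, List.flatMap_cons, List.flatMap_map]
    have hcomp : (fun k => candF (a :: t) (Nat.succ k)) = candF t := by
      funext k; exact candF_succ a t k
    rw [hcomp, ih]
    match t with
    | [] => simp [candF, cands]
    | [b] => simp [candF, cands]
    | b :: c :: r =>
      show candF (a :: b :: c :: r) 0 ++ cands (b :: c :: r) = cands (a :: b :: c :: r)
      have hc : candF (a :: b :: c :: r) 0 = (checkListP a b c).toList := by
        unfold candF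
        rw [if_pos (by simp; omega)]
        norm_num [PySem.List.pyGetD_ofNat', PySem.List.pyGetD_zero_cons]
      rw [hc]; rfl

-- A's index loop builds exactly `cands numbers`
theorem loop_eq_cands (numbers : List Int) :
    (PySem.List.pyRange 0 (numbers.length : Int) 1).foldl
      (fun acc v =>
        if v < (numbers.length : Int) - 2 then
          match checkListP (PySem.List.pyGetD numbers v 0) (PySem.List.pyGetD numbers (v+1) 0)
                           (PySem.List.pyGetD numbers (v+2) 0) with
          | some t => acc ++ [t]
          | none => acc
        else acc) [] = cands numbers := by
  have hbody :
      (fun (acc : List (List Int × Int)) (v : Int) =>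
        if v < (numbers.length : Int) - 2 then
          match checkListP (PySem.List.pyGetD numbers v 0) (PySem.List.pyGetD numbers (v+1) 0)
                           (PySem.List.pyGetD numbers (v+2) 0) with
          | some t => acc ++ [t]
          | none => acc
        else acc)
      = (fun acc v => acc ++
          (if v < (numbers.length : Int) - 2 then
            (checkListP (PySem.List.pyGetD numbers v 0) (PySem.List.pyGetD numbers (v+1) 0)
              (PySem.List.pyGetD numbers (v+2) 0)).toList
          else [])) := by
    funext acc v
    by_cases h : v < (numbers.length : Int) - 2
    · simp only [if_pos h]
      cases hc : checkListP (PySem.List.pyGetD numbers v 0) (PySem.List.pyGetD numbers (v+1) 0)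
        (PySem.List.pyGetD numbers (v+2) 0) <;> simp
    · simp [h]
  rw [hbody, PySem.List.foldl_append_eq_flatMap, List.nil_append,
    PySem.List.pyRange_zero_natCast, List.flatMap_map]
  exact range_flatMap_eq_cands numbers

-- head of a stably sorted list is the first key-minimal element
theorem head?_foldl_insertBy {α : Type} (key : α → Int) (xs ys : List α) :
    (xs.foldl (fun acc x => PySem.List.insertBy (fun a b => decide (key a < key b)) x acc) ys).head? =
    xs.foldl (fun acc x => match acc with
      | none => some x
      | some m => if key x < key m then some x else some m) ys.head? := by
  induction xs generalizing ys with
  | nil => rfl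
  | cons x t ih =>
    rw [List.foldl_cons, List.foldl_cons, ih]
    congr 1
    cases ys with
    | nil => rfl
    | cons y ys' =>
      simp only [PySem.List.insertBy, List.head?_cons]
      split <;> simp_all

theorem head?_sorted_eq_min? (xs : List (List Int × Int)) :
    (PySem.List.sorted xs (fun x => x.2) false).head? = PySem.List.min? xs (fun x => x.2) := by
  simpa [PySem.List.sorted, PySem.List.min?] using
    head?_foldl_insertBy (fun x : List Int × Int => x.2) xs []

-- the first-min accumulator step
def minStep (acc : Option (List Int × Int)) (x : List Int × Int) : Option (List Int × Int) :=
  match acc with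
  | none => some x
  | some m => if x.2 < m.2 then some x else some m

theorem foldl_minStep_eq_min? (xs : List (List Int × Int)) :
    xs.foldl minStep none = PySem.List.min? xs (fun x => x.2) := by
  rw [PySem.List.min?]
  congr 1
  funext acc x; cases acc <;> rfl

-- B's loop is the first-min fold over the candidate list
theorem bestLoop_eq_foldl (xs : List Int) (acc : Option (List Int × Int)) :
    bestLoop acc xs = (cands xs).foldl minStep acc := by
  induction xs generalizing acc with
  | nil => rfl
  | cons a t ih =>
    match t with
    | [] => rfl
    | [b] => rfl
    | b :: c :: r =>
      rw [show bestLoop acc (a :: b :: c :: r) = bestLoop (bestStep acc a b c) (b :: c :: r) from rfl,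
        ih, show cands (a :: b :: c :: r) = (checkListP a b c).toList ++ cands (b :: c :: r) from rfl,
        List.foldl_append]
      congr 1
      rw [checkListP_eq, bestStep]
      split_ifs <;> cases acc <;> simp [minStep]

-- ===== VERDICT (by name: the statement is the Claim_ definition above) =====
theorem three_amigos_spec : Claim_equal_three_amigos := by
  intro numbers _
  show three_amigos numbers = three_amigos_alt numbers
  have hA : three_amigos numbers =
      (match PySem.List.min? (cands numbers) (fun x => x.2) with
        | some m => m.1
        | none => []) := by
    simp only [three_amigos]
    rw [loop_eq_cands, ← head?_sorted_eq_min?]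
    cases PySem.List.sorted (cands numbers) (fun x => x.2) false <;> simp
  have hB : three_amigos_alt numbers =
      (match PySem.List.min? (cands numbers) (fun x => x.2) with
        | some m => m.1
        | none => []) := by
    simp only [three_amigos_alt]
    rw [bestLoop_eq_foldl, foldl_minStep_eq_min?]
  rw [hA, hB]
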